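-- pv_equiv track=rewrite | github.com/pcrtj/Enhanced-Golf-Swing-Evaluation-with-MediaPipe | Model/process_cleandata.py | ensure_all_poses
-- ===== SOURCE A (Python) =====
-- correct_sequence = ['Preparation', 'Address', 'Toe-Up', 'Mid-Backswing', 'Top', 'Mid-Downswing', 'Impact', 'Mid-Follow-Through', 'Finish']
--
-- def ensure_all_poses(cleaned_predictions):
--     for pose in correct_sequence:
--         if pose not in cleaned_predictions:
--             # หาตำแหน่งที่เหมาะสมที่สุดที่จะแทรกท่าทางที่หายไป
--             ideal_index = correct_sequence.index(pose)
--             for i, pred in enumerate(cleaned_predictions):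
--                 if correct_sequence.index(pred) > ideal_index:
--                     cleaned_predictions.insert(i, pose)
--                     break
--             else:
--                 # ถ้าไม่มีตำแหน่งที่เหมาะสม ให้เพิ่มท่าทางที่หายไปที่ท้ายสุด
--                 cleaned_predictions.append(pose)
--     return cleaned_predictions
-- ===== SOURCE B (Python) =====
-- correct_sequence = ['Preparation', 'Address', 'Toe-Up', 'Mid-Backswing', 'Top', 'Mid-Downswing', 'Impact', 'Mid-Follow-Through', 'Finish']
--
-- def ensure_all_poses(cleaned_predictions):
--     # One left-to-right merge pass instead of A's repeated insert-and-rescan;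
--     # mutates cleaned_predictions in place (slice-assign) like A does.
--     missing = [p for p in correct_sequence if p not in cleaned_predictions]
--     result = []
--     for pred in cleaned_predictions:
--         if missing:
--             r = correct_sequence.index(pred)
--             while missing and correct_sequence.index(missing[0]) < r:
--                 result.append(missing.pop(0))
--         result.append(pred)
--     result.extend(missing)
--     cleaned_predictions[:] = result
--     return cleaned_predictions
-- ===== Notes on version B (the rewrite author's own statement) =====
-- stated objective: alternative
-- what changed: Replaced A's per-pose insert-and-rescan (for each missing pose, rescan the list from the start to find the insertion point and insert in place) with a single left-to-right merge pass: compute the missing poses once in sequence order, then walk the existing predictions, emitting each still-missing pose of strictly smaller rank before the element it precedes, appending leftovers at the end, and slice-assigning the result back so the list is mutated in place exactly as A does.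
import Mathlib
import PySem

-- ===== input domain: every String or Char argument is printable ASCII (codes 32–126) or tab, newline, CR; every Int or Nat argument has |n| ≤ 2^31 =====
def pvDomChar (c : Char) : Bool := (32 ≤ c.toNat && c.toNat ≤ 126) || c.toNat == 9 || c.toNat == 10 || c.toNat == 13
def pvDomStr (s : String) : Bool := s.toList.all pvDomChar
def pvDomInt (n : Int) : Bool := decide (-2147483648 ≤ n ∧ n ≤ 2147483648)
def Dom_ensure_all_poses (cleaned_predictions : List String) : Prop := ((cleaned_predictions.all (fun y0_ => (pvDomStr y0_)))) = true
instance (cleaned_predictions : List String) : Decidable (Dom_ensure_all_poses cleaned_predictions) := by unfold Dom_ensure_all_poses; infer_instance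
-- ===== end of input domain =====

-- B builds the result in one left-to-right merge pass instead of A's repeated insert-and-rescan;
-- same return value, and B performs the same in-place mutation (slice-assign) as A's inserts/appends.

-- ===== PORT A =====
def correct_sequence : List String :=
  ["Preparation", "Address", "Toe-Up", "Mid-Backswing", "Top", "Mid-Downswing", "Impact", "Mid-Follow-Through", "Finish"]

-- correct_sequence.index(s); 'none' (Python's ValueError) is mapped to 9 — reachable only outside Pre_.
def rank (s : String) : Nat := (PySem.List.index? correct_sequence s).getD 9

-- A's inner loop: 'for i, pred in enumerate(...): if index(pred) > ideal: insert(i, pose); break / else: append(pose)'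
def insBefore (p : String) (r : Nat) : List String → List String
  | [] => [p]
  | e :: l => if rank e > r then p :: e :: l else e :: insBefore p r l

-- A's outer loop body
def stepA (acc : List String) (pose : String) : List String :=
  if acc.contains pose then acc else insBefore pose (rank pose) acc

def ensure_all_poses (cleaned_predictions : List String) : List String :=
  List.foldl stepA cleaned_predictions correct_sequence

-- ===== PORT B =====
-- the walk over the existing predictions: 'if missing: r = index(pred); while missing and index(missing[0]) < r: pop' ... 'result.extend(missing)'
def mergeGo : List String → List String → List String
  | [], m => m
  | e :: l, m =>
    if m.isEmpty then e :: mergeGo l m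
    else (m.takeWhile fun q => rank q < rank e) ++ e :: mergeGo l (m.dropWhile fun q => rank q < rank e)

def ensure_all_poses_alt (cleaned_predictions : List String) : List String :=
  mergeGo cleaned_predictions (correct_sequence.filter fun p => !cleaned_predictions.contains p)

-- ===== PRECONDITION & SPEC =====
-- Pre_ excludes exactly the inputs on which Python A raises ValueError from correct_sequence.index:
-- those containing a string outside correct_sequence that some missing pose's scan reaches
-- (i.e. some missing pose has no strictly-greater-rank element before the first unknown string).
def Pre_ensure_all_poses (cleaned_predictions : List String) : Prop :=
  (∀ x ∈ cleaned_predictions, x ∈ correct_sequence) ∨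
  (∀ p ∈ correct_sequence, p ∉ cleaned_predictions →
    ∃ e ∈ cleaned_predictions.takeWhile (fun x => correct_sequence.contains x), rank p < rank e)
instance (cleaned_predictions : List String) : Decidable (Pre_ensure_all_poses cleaned_predictions) := by
  unfold Pre_ensure_all_poses; infer_instance

def pvWitness_ensure_all_poses : List String := ["Top", "Address"]

def Spec_ensure_all_poses (cleaned_predictions : List String) (out : List String) : Prop := out = ensure_all_poses_alt cleaned_predictions
instance (cleaned_predictions : List String) (out : List String) : Decidable (Spec_ensure_all_poses cleaned_predictions out) := by unfold Spec_ensure_all_poses; infer_instance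

-- ===== CLAIM (what is proved, stated in full; the proofs are below) =====
def Claim_equal_ensure_all_poses : Prop := ∀ (cleaned_predictions : List String), Dom_ensure_all_poses cleaned_predictions → Pre_ensure_all_poses cleaned_predictions → Spec_ensure_all_poses cleaned_predictions (ensure_all_poses cleaned_predictions)

-- ===== LEMMAS AND PROOFS =====

theorem mergeGo_nil : ∀ l : List String, mergeGo l [] = l := by
  intro l; induction l with
  | nil => rfl
  | cons e l ih => simp [mergeGo, ih]

theorem mem_insBefore (p q : String) (r : Nat) :
    ∀ l : List String, q ∈ insBefore p r l ↔ q = p ∨ q ∈ l := by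
  intro l; induction l with
  | nil => simp [insBefore]
  | cons e l ih =>
    by_cases h : rank e > r
    · simp [insBefore, h]
    · simp [insBefore, h, ih]; tauto

-- the commuting lemma: inserting p into l first, then merging m, equals merging p::m into l
theorem mergeGo_insBefore (p : String) (l m : List String)
    (h : ∀ q ∈ m, rank p < rank q) :
    mergeGo (insBefore p (rank p) l) m = mergeGo l (p :: m) := by
  induction l generalizing m with
  | nil =>
    cases m with
    | nil => simp [insBefore, mergeGo]
    | cons q m' =>
      have hq := h q (by simp)
      simp [insBefore, mergeGo, List.takeWhile, List.dropWhile, Nat.lt_asymm hq]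
  | cons e l ih =>
    by_cases he : rank e > rank p
    · -- insert happens here: insBefore = p :: e :: l
      cases m with
      | nil =>
        simp [insBefore, he, mergeGo, List.takeWhile, List.dropWhile, mergeGo_nil]
      | cons q m' =>
        have hq := h q (by simp)
        simp [insBefore, he, mergeGo, List.takeWhile, List.dropWhile, Nat.lt_asymm hq]
    · -- rank e ≤ rank p: keep e, recurse
      have he' : ¬ rank p < rank e := he
      cases m with
      | nil =>
        have := ih ([]) (by simp)
        simp [insBefore, he, mergeGo, List.takeWhile, List.dropWhile, this]
      | cons q m' =>
        have hq := h q (by simp)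
        have hqe : ¬ rank q < rank e := fun hh => he' (lt_trans (h q (by simp)) hh)
        have tw : (q :: m').takeWhile (fun x => decide (rank x < rank e)) = [] := by
          simp [List.takeWhile, hqe]
        have dw : (q :: m').dropWhile (fun x => decide (rank x < rank e)) = q :: m' := by
          simp [List.dropWhile, hqe]
        have := ih (q :: m') h
        simp [insBefore, he, mergeGo, tw, dw, this]

theorem foldl_stepA (ps : List String) :
    ps.Pairwise (fun a b => rank a < rank b) →
    ∀ l : List String, List.foldl stepA l ps = mergeGo l (ps.filter fun p => !l.contains p) := by
  induction ps with
  | nil => intro _ l; simp [mergeGo_nil]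
  | cons p ps ih =>
    intro hp l
    have hhead : ∀ q ∈ ps, rank p < rank q := (List.pairwise_cons.mp hp).1
    have htail := (List.pairwise_cons.mp hp).2
    rw [List.foldl_cons]
    by_cases hmem : l.contains p
    · have hm' : p ∈ l := by simpa using hmem
      have : (p :: ps).filter (fun q => !l.contains q) = ps.filter (fun q => !l.contains q) := by
        simp [List.filter, hm']
      rw [this, stepA, if_pos hmem, ih htail l]
    · have hins := ih htail (insBefore p (rank p) l)
      have hfc : ps.filter (fun q => !(insBefore p (rank p) l).contains q)
          = ps.filter (fun q => !l.contains q) := by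
        apply List.filter_congr
        intro q hq
        have hne : q ≠ p := fun hqp => absurd (hqp ▸ hhead q hq) (lt_irrefl _)
        simp [mem_insBefore, hne]
      have hflt : ∀ q ∈ ps.filter (fun q => !l.contains q), rank p < rank q := by
        intro q hq; exact hhead q (List.mem_of_mem_filter hq)
      have hm' : p ∉ l := by simpa using hmem
      have : (p :: ps).filter (fun q => !l.contains q) = p :: ps.filter (fun q => !l.contains q) := by
        simp [List.filter, hm']
      rw [stepA, if_neg hmem, hins, hfc, mergeGo_insBefore p l _ hflt, this]

theorem seq_pairwise : correct_sequence.Pairwise (fun a b => rank a < rank b) := by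
  decide

-- ===== VERDICT (by name: the statement is the Claim_ definition above) =====
theorem ensure_all_poses_spec : Claim_equal_ensure_all_poses := by
  intro l _ _
  unfold Spec_ensure_all_poses ensure_all_poses ensure_all_poses_alt
  exact foldl_stepA correct_sequence seq_pairwise l
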